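-- pv_equiv track=rewrite | github.com/bensondaled/calendar-management | util.py | create_id
-- ===== SOURCE A (Python) =====
-- def create_id(base, id):
--     eid = base + id.replace('_', '')
--     for ch in eid:
--         eid = eid.replace(ch, ch.lower())
--     eid = eid.replace('w', 'avva')
--     eid = eid.replace('x', 'avvva')
--     eid = eid.replace('y', 'avvvva')
--     eid = eid.replace('z', 'avvvvva')
--     return eid
-- ===== SOURCE B (Python) =====
-- _EXPAND = {'w': 'avva', 'x': 'avvva', 'y': 'avvvva', 'z': 'avvvvva'}
--
-- def create_id(base, id):
--     s = base + id.replace('_', '')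
--     return ''.join(_EXPAND.get(c.lower(), c.lower()) for c in s)
-- ===== Notes on version B (the rewrite author's own statement) =====
-- stated objective: simpler
-- what changed: Replaces the per-character lowercasing replace loop plus four sequential full-string replace passes with a single left-to-right pass that lowercases each character and expands it through a lookup table.
import Mathlib
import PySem

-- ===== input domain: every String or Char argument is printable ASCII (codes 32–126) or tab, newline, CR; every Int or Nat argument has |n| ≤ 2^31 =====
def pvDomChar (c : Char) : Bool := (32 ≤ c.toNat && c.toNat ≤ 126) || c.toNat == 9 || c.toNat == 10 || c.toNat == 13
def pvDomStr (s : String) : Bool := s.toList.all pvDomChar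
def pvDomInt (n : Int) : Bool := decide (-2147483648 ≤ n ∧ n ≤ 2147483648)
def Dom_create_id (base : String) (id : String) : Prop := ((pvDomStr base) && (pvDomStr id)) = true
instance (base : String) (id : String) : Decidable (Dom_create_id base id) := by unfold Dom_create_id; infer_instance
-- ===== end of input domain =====

-- B replaces A's per-character lowercasing replace loop plus four sequential whole-string
-- replace passes by a single left-to-right table-driven pass (simpler, one pass).

-- ===== PORT A =====
-- literal transliteration of A (strings handled as their code-point lists, PySem.Chars.* exact)
def create_id (base : String) (id : String) : String :=
  let eid := base.toList ++ PySem.Chars.replace id.toList ['_'] []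
  let eid := eid.foldl (fun s ch => PySem.Chars.replace s [ch] (PySem.Chars.lower [ch])) eid
  let eid := PySem.Chars.replace eid ['w'] "avva".toList
  let eid := PySem.Chars.replace eid ['x'] "avvva".toList
  let eid := PySem.Chars.replace eid ['y'] "avvvva".toList
  let eid := PySem.Chars.replace eid ['z'] "avvvvva".toList
  String.mk eid

-- ===== PORT B =====
-- the module-level table _EXPAND (Python's 1-char string keys ported as Char)
def pvExpand : PySem.Dict Char (List Char) :=
  PySem.Dict.mk [('w', "avva".toList), ('x', "avvva".toList),
                 ('y', "avvvva".toList), ('z', "avvvvva".toList)]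

def create_id_alt (base : String) (id : String) : String :=
  let s := base.toList ++ PySem.Chars.replace id.toList ['_'] []
  String.mk (PySem.Chars.join []
    (s.map (fun c => pvExpand.getD (PySem.Chars.lowerChar c) [PySem.Chars.lowerChar c])))

-- ===== PRECONDITION & SPEC =====
def Spec_create_id (base : String) (id : String) (out : String) : Prop := out = create_id_alt base id
instance (base : String) (id : String) (out : String) : Decidable (Spec_create_id base id out) := by unfold Spec_create_id; infer_instance

-- ===== CLAIM (what is proved, stated in full; the proofs are below) =====
def Claim_equal_create_id : Prop := ∀ (base : String) (id : String), Dom_create_id base id → Spec_create_id base id (create_id base id)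

-- ===== LEMMAS AND PROOFS =====

-- str.replace with a one-character pattern is a character substitution
theorem go_single (a : Char) (new : List Char) :
    ∀ (l : List Char) (fuel : Nat) (acc : List Char), l.length ≤ fuel →
    PySem.Chars.replace.go [a] new fuel l acc
      = acc.reverse ++ l.flatMap (fun c => if c = a then new else [c]) := by
  intro l
  induction l with
  | nil => intro fuel acc h; cases fuel <;> simp [PySem.Chars.replace.go]
  | cons c t ih =>
    intro fuel acc h
    cases fuel with
    | zero => simp at h
    | succ f =>
      rw [PySem.Chars.replace.go]
      by_cases hc : c = a
      · have hp : [a].isPrefixOf (c :: t) = true := by simp [List.isPrefixOf, hc]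
        simp [ih f _ (by simpa using h), hc]
      · have hp : [a].isPrefixOf (c :: t) = false := by
          simp [List.isPrefixOf]
          exact fun h' => hc h'.symm
        simp [hp, ih f _ (by simpa using h), hc]

theorem replace_single (l : List Char) (a : Char) (new : List Char) :
    PySem.Chars.replace l [a] new = l.flatMap (fun c => if c = a then new else [c]) := by
  rw [PySem.Chars.replace]
  simp [go_single a new l l.length [] le_rfl]

theorem repl_map (l : List Char) (a b : Char) :
    PySem.Chars.replace l [a] [b] = l.map (fun c => if c = a then b else c) := by
  rw [replace_single]
  have h : ∀ c, (if c = a then [b] else [c]) = [if c = a then b else c] := by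
    intro c; split <;> rfl
  simp only [h, ← List.map_eq_flatMap]

theorem low_idem (c : Char) :
    PySem.Chars.lowerChar (PySem.Chars.lowerChar c) = PySem.Chars.lowerChar c := by
  unfold PySem.Chars.lowerChar PySem.Chars.isupper
  by_cases h : 'A' ≤ c ∧ c ≤ 'Z'
  · obtain ⟨h1, h2⟩ := h
    have hv1 : 65 ≤ c.toNat := Nat.succ_le_of_lt h1
    have hv2 : c.toNat ≤ 90 := h2
    have hval : (Char.ofNat (c.toNat + 32)).toNat = c.toNat + 32 := by
      unfold Char.ofNat
      rw [dif_pos (Or.inl (by omega : c.toNat + 32 < 0xd800))]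
      rfl
    simp only [h1, h2, decide_true, Bool.and_self, if_true]
    have hne : ¬ (Char.ofNat (c.toNat + 32) ≤ 'Z') := by
      intro b
      have : (Char.ofNat (c.toNat + 32)).toNat ≤ 90 := b
      omega
    simp [hne]
  · rcases Decidable.not_and_iff_not_or_not.mp h with h' | h' <;> simp [h']

-- state of A's lowercasing loop after processing the characters satisfying P
def pvG (P : Char → Bool) (c : Char) : Char := if P c then PySem.Chars.lowerChar c else c

theorem low_step (l0 : List Char) (P : Char → Bool) (ch : Char) :
    PySem.Chars.replace (l0.map (pvG P)) [ch] (PySem.Chars.lower [ch])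
      = l0.map (pvG (fun c => P c || decide (c = ch))) := by
  have hlow : PySem.Chars.lower [ch] = [PySem.Chars.lowerChar ch] := rfl
  rw [hlow, repl_map, List.map_map]
  apply List.map_congr_left
  intro c _
  simp only [Function.comp, pvG]
  by_cases hp : P c
  · by_cases he : PySem.Chars.lowerChar c = ch
    · rw [if_pos hp, if_pos he, ← he, low_idem, if_pos (by simp [hp])]
    · rw [if_pos hp, if_neg he, if_pos (by simp [hp])]
  · by_cases he : c = ch
    · rw [if_neg hp, if_pos he, he, if_pos (by simp)]
    · rw [if_neg hp, if_neg he, if_neg (by simp [hp, he])]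

theorem low_loop (iter : List Char) :
    ∀ (P : Char → Bool) (l0 : List Char),
    iter.foldl (fun s ch => PySem.Chars.replace s [ch] (PySem.Chars.lower [ch])) (l0.map (pvG P))
      = l0.map (pvG (fun c => P c || decide (c ∈ iter))) := by
  induction iter with
  | nil => intro P l0; simp
  | cons ch t ih =>
    intro P l0
    rw [List.foldl_cons, low_step, ih]
    apply List.map_congr_left
    intro c _
    simp only [pvG, List.mem_cons]
    by_cases h1 : P c <;> by_cases h2 : c = ch <;> by_cases h3 : c ∈ t <;> simp [h1, h2, h3]

-- the per-character expansion table as a function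
def pvH (d : Char) : List Char :=
  if d = 'w' then "avva".toList
  else if d = 'x' then "avvva".toList
  else if d = 'y' then "avvvva".toList
  else if d = 'z' then "avvvvva".toList
  else [d]

theorem expand_chain (m : List Char) :
    PySem.Chars.replace
      (PySem.Chars.replace
        (PySem.Chars.replace
          (PySem.Chars.replace m ['w'] "avva".toList) ['x'] "avvva".toList)
        ['y'] "avvvva".toList)
      ['z'] "avvvvva".toList
      = m.flatMap pvH := by
  simp only [replace_single, List.flatMap_assoc]
  apply List.flatMap_congr
  intro d _
  by_cases h1 : d = 'w'
  · subst h1; decide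
  by_cases h2 : d = 'x'
  · subst h2; decide
  by_cases h3 : d = 'y'
  · subst h3; decide
  by_cases h4 : d = 'z'
  · subst h4; decide
  simp [pvH, h1, h2, h3, h4]

theorem getD_expand (d : Char) : pvExpand.getD d [d] = pvH d := by
  by_cases h1 : d = 'w'
  · subst h1; decide
  by_cases h2 : d = 'x'
  · subst h2; decide
  by_cases h3 : d = 'y'
  · subst h3; decide
  by_cases h4 : d = 'z'
  · subst h4; decide
  have b1 : ('w' == d) = false := by simp; exact fun h => h1 h.symm
  have b2 : ('x' == d) = false := by simp; exact fun h => h2 h.symm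
  have b3 : ('y' == d) = false := by simp; exact fun h => h3 h.symm
  have b4 : ('z' == d) = false := by simp; exact fun h => h4 h.symm
  simp [pvExpand, pvH, PySem.Dict.getD, PySem.Dict.get?, b1, b2, b3, b4, h1, h2, h3, h4]

theorem join_flatten (ps : List (List Char)) : PySem.Chars.join [] ps = ps.flatten := by
  show ([] : List Char).intercalate ps = ps.flatten
  rw [List.intercalate]
  induction ps with
  | nil => rfl
  | cons p t ih =>
    cases t with
    | nil => rfl
    | cons q u => simpa [List.intersperse] using ih

-- both pipelines, on an arbitrary character list
theorem main_list (l0 : List Char) :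
    PySem.Chars.replace
      (PySem.Chars.replace
        (PySem.Chars.replace
          (PySem.Chars.replace
            (l0.foldl (fun s ch => PySem.Chars.replace s [ch] (PySem.Chars.lower [ch])) l0)
            ['w'] "avva".toList) ['x'] "avvva".toList)
        ['y'] "avvvva".toList)
      ['z'] "avvvvva".toList
      = PySem.Chars.join []
          (l0.map (fun c => pvExpand.getD (PySem.Chars.lowerChar c) [PySem.Chars.lowerChar c])) := by
  have e0 : l0.map (pvG fun _ => false) = l0 := by
    have h : ∀ c ∈ l0, pvG (fun _ => false) c = id c := fun c _ => by simp [pvG]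
    rw [List.map_congr_left h, List.map_id]
  have hloop := low_loop l0 (fun _ => false) l0
  rw [e0] at hloop
  have hlow : l0.foldl (fun s ch => PySem.Chars.replace s [ch] (PySem.Chars.lower [ch])) l0
      = l0.map PySem.Chars.lowerChar := by
    rw [hloop]
    apply List.map_congr_left
    intro c hc
    simp [pvG, hc]
  rw [hlow, expand_chain, join_flatten]
  have : (l0.map (fun c => pvExpand.getD (PySem.Chars.lowerChar c) [PySem.Chars.lowerChar c]))
      = l0.map (fun c => pvH (PySem.Chars.lowerChar c)) := by
    apply List.map_congr_left
    intro c _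
    exact getD_expand _
  rw [this, List.flatMap_map, List.flatMap_def]

-- ===== VERDICT (by name: the statement is the Claim_ definition above) =====
theorem create_id_spec : Claim_equal_create_id := by
  intro base id _
  unfold Spec_create_id create_id create_id_alt
  exact congrArg String.mk (main_list _)
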